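-- pv_equiv track=rewrite | github.com/Kymylyy/mica-register | scripts/validate_csv.py | determine_exit_code
-- ===== SOURCE A (Python) =====
-- def determine_exit_code(report: dict, strict: bool = False) -> int:
--     """Determine exit code based on issues"""
--     issues = report["issues"]
--     error_count = sum(1 for issue in issues if issue["severity"] == "ERROR")
--     warning_count = sum(1 for issue in issues if issue["severity"] == "WARNING")
--
--     if strict:
--         # Treat warnings as errors
--         if error_count + warning_count > 0:
--             return 2
--         return 0
--     else:
--         if error_count > 0:
--             return 2
--         if warning_count > 0:
--             return 1
--         return 0
-- ===== SOURCE B (Python) =====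
-- def determine_exit_code(report: dict, strict: bool = False) -> int:
--     """Determine exit code based on issues"""
--     level_map = {"ERROR": 2, "WARNING": 1}
--     level = max((level_map.get(issue["severity"], 0) for issue in report["issues"]),
--                 default=0)
--     if strict:
--         return 2 if level > 0 else 0
--     return level
-- ===== Notes on version B (the rewrite author's own statement) =====
-- stated objective: simpler
-- what changed: Replaces A's two separate severity counts and branch ladder with a single max-reduction over a severity-to-level map plus one branch.
import Mathlib
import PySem

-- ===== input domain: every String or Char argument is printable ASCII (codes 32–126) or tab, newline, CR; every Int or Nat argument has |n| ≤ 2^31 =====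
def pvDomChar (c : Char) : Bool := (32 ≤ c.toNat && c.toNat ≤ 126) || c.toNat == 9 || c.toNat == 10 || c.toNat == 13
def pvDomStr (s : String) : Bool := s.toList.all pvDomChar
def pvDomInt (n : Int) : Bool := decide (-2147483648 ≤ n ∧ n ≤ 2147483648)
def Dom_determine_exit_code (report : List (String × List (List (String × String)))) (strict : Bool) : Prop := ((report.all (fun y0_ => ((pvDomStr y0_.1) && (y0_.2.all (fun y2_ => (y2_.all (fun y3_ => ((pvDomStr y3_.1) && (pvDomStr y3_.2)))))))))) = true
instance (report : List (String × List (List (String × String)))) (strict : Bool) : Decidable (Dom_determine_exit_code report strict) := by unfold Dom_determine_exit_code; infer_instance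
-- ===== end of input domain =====

-- B replaces A's two severity counts and branch ladder with a single max-reduction
-- over a severity-to-level map plus one branch (objective: simpler).

-- ===== PORT A =====
def determine_exit_code (report : List (String × List (List (String × String)))) (strict : Bool) : Int :=
  match PySem.Dict.get? (PySem.Dict.mk report) "issues" with
  | none => 0  -- unreachable under Pre_ (Python raises KeyError)
  | some issues =>
    let error_count : Int := issues.foldl
      (fun acc issue => if PySem.Dict.get? (PySem.Dict.mk issue) "severity" = some "ERROR" then acc + 1 else acc) 0
    let warning_count : Int := issues.foldl
      (fun acc issue => if PySem.Dict.get? (PySem.Dict.mk issue) "severity" = some "WARNING" then acc + 1 else acc) 0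
    if strict then
      if error_count + warning_count > 0 then 2 else 0
    else
      if error_count > 0 then 2
      else if warning_count > 0 then 1
      else 0

-- ===== PORT B =====
-- level_map.get(sev, 0)
def pvLevelOf (sev : String) : Int :=
  if sev = "ERROR" then 2 else if sev = "WARNING" then 1 else 0

def determine_exit_code_alt (report : List (String × List (List (String × String)))) (strict : Bool) : Int :=
  match PySem.Dict.get? (PySem.Dict.mk report) "issues" with
  | none => 0  -- unreachable under Pre_ (Python raises KeyError)
  | some issues =>
    let level : Int := issues.foldl
      (fun acc issue => max acc (pvLevelOf (PySem.Dict.getD (PySem.Dict.mk issue) "severity" ""))) 0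
    if strict then (if level > 0 then 2 else 0) else level

-- ===== PRECONDITION & SPEC =====
-- Pre_ excludes exactly the inputs where Python raises KeyError: a report without an
-- "issues" key, or an issue without a "severity" key (both A and B raise there).
def Pre_determine_exit_code (report : List (String × List (List (String × String)))) (strict : Bool) : Prop :=
  (PySem.Dict.get? (PySem.Dict.mk report) "issues").isSome = true ∧
  ∀ issue ∈ (PySem.Dict.get? (PySem.Dict.mk report) "issues").getD [],
    (PySem.Dict.get? (PySem.Dict.mk issue) "severity").isSome = true
instance (report : List (String × List (List (String × String)))) (strict : Bool) : Decidable (Pre_determine_exit_code report strict) := by unfold Pre_determine_exit_code; infer_instance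

def pvWitness_determine_exit_code : (List (String × List (List (String × String)))) × Bool :=
  ([("issues", [[("severity", "ERROR")], [("severity", "INFO")]])], true)

def Spec_determine_exit_code (report : List (String × List (List (String × String)))) (strict : Bool) (out : Int) : Prop := out = determine_exit_code_alt report strict
instance (report : List (String × List (List (String × String)))) (strict : Bool) (out : Int) : Decidable (Spec_determine_exit_code report strict out) := by unfold Spec_determine_exit_code; infer_instance

-- ===== CLAIM (what is proved, stated in full; the proofs are below) =====
def Claim_equal_determine_exit_code : Prop := ∀ (report : List (String × List (List (String × String)))) (strict : Bool), Dom_determine_exit_code report strict → Pre_determine_exit_code report strict → Spec_determine_exit_code report strict (determine_exit_code report strict)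

-- ===== LEMMAS AND PROOFS =====

-- Relation between A's two counts and B's max level, proved by appending one issue at a time.
theorem pv_fold_key (issues : List (List (String × String))) :
    (0 ≤ issues.foldl (fun acc issue => if PySem.Dict.get? (PySem.Dict.mk issue) "severity" = some "ERROR" then acc + 1 else acc) (0:Int)) ∧
    (0 ≤ issues.foldl (fun acc issue => if PySem.Dict.get? (PySem.Dict.mk issue) "severity" = some "WARNING" then acc + 1 else acc) (0:Int)) ∧
    (issues.foldl (fun acc issue => max acc (pvLevelOf (PySem.Dict.getD (PySem.Dict.mk issue) "severity" ""))) (0:Int)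
      = if issues.foldl (fun acc issue => if PySem.Dict.get? (PySem.Dict.mk issue) "severity" = some "ERROR" then acc + 1 else acc) (0:Int) > 0 then 2
        else if issues.foldl (fun acc issue => if PySem.Dict.get? (PySem.Dict.mk issue) "severity" = some "WARNING" then acc + 1 else acc) (0:Int) > 0 then 1
        else 0) := by
  induction issues using List.reverseRecOn with
  | nil => simp
  | append_singleton xs x ih =>
    obtain ⟨he, hw, hl⟩ := ih
    simp only [List.foldl_append, List.foldl_cons, List.foldl_nil]
    rw [hl]
    have hgd : PySem.Dict.getD (PySem.Dict.mk x) "severity" ""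
        = (PySem.Dict.get? (PySem.Dict.mk x) "severity").getD "" := by
      simp [PySem.Dict.getD_eq_get?_getD]
    rcases h : PySem.Dict.get? (PySem.Dict.mk x) "severity" with _ | sev
    · rw [hgd, h]
      simp only [pvLevelOf, Option.getD_none, reduceCtorEq,
        String.reduceEq, if_false, max_def]
      split_ifs <;> omega
    · rw [hgd, h]
      by_cases he2 : sev = "ERROR"
      · subst he2
        simp only [pvLevelOf, Option.getD_some, Option.some.injEq,
          String.reduceEq, if_true, if_false, max_def]
        split_ifs <;> omega
      · by_cases hw2 : sev = "WARNING"
        · subst hw2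
          simp only [pvLevelOf, Option.getD_some, Option.some.injEq,
            String.reduceEq, if_true, if_false, max_def]
          split_ifs <;> omega
        · simp only [pvLevelOf, Option.getD_some, Option.some.injEq, he2, hw2,
            if_false, max_def]
          split_ifs <;> omega

-- ===== VERDICT (by name: the statement is the Claim_ definition above) =====
theorem determine_exit_code_spec : Claim_equal_determine_exit_code := by
  intro report strict _ _
  unfold Spec_determine_exit_code determine_exit_code determine_exit_code_alt
  cases h : PySem.Dict.get? (PySem.Dict.mk report) "issues" with
  | none => rfl
  | some issues =>
    obtain ⟨he, hw, hl⟩ := pv_fold_key issues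
    simp only [hl]
    cases strict <;> split_ifs <;> omega
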